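-- pv_equiv track=rewrite | github.com/deanmauriceellis-cloud/LocationMapApp | tools/salem-data/generate_teaser_narrations.py | _gen_attraction
-- ===== SOURCE A (Python) =====
-- def _gen_attraction(name, loc, street, detail, hist, desc, cuisine):
--     if detail:
--         return f"{name}. {detail}"
--     nl = name.lower()
--     if any(kw in nl for kw in ['field', 'court', 'batting cage', 'rink', 'arena']):
--         return f"{name}{loc}. Sports and recreation facility"
--     if any(kw in nl for kw in ['fitness', 'gym', 'ymca', 'planet fitness']):
--         return f"{name}{loc}. Gym and fitness center"
--     if any(kw in nl for kw in ['statue', 'sculpture', 'monument', 'memorial']):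
--         return f"{name}{loc}. Public monument worth a photo"
--     if any(kw in nl for kw in ['festival', 'fair', 'event']):
--         return f"{name}. Seasonal event and entertainment in Salem"
--     if any(kw in nl for kw in ['photo', 'portrait']):
--         return f"{name}{loc}. Photography and portrait sessions in Salem"
--     return f"{name}{loc}. Salem attraction worth a stop"
-- ===== SOURCE B (Python) =====
-- # One flat pass over a keyword->priority list keeping the minimum matched
-- # priority, then a separate render step; no per-group any() scans.
-- _KW = [
--     ('field', 0), ('court', 0), ('batting cage', 0), ('rink', 0), ('arena', 0),
--     ('fitness', 1), ('gym', 1), ('ymca', 1), ('planet fitness', 1),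
--     ('statue', 2), ('sculpture', 2), ('monument', 2), ('memorial', 2),
--     ('festival', 3), ('fair', 3), ('event', 3),
--     ('photo', 4), ('portrait', 4),
-- ]
--
-- _RENDER = [
--     (True, '. Sports and recreation facility'),
--     (True, '. Gym and fitness center'),
--     (True, '. Public monument worth a photo'),
--     (False, '. Seasonal event and entertainment in Salem'),
--     (True, '. Photography and portrait sessions in Salem'),
-- ]
--
--
-- def _gen_attraction(name, loc, street, detail, hist, desc, cuisine):
--     if detail:
--         return f"{name}. {detail}"
--     nl = name.lower()
--     best = None
--     for kw, pri in _KW: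
--         if kw in nl and (best is None or pri < best):
--             best = pri
--     if best is None:
--         return f"{name}{loc}. Salem attraction worth a stop"
--     include_loc, tail = _RENDER[best]
--     return name + (loc if include_loc else '') + tail
-- ===== Notes on version B (the rewrite author's own statement) =====
-- stated objective: alternative
-- what changed: Instead of A's ordered chain of per-group any() scans with early return, B makes one flat pass over a keyword-to-priority list maintaining the minimum matched priority, then renders the result from a separate (include_loc, tail) table.
import Mathlib
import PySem

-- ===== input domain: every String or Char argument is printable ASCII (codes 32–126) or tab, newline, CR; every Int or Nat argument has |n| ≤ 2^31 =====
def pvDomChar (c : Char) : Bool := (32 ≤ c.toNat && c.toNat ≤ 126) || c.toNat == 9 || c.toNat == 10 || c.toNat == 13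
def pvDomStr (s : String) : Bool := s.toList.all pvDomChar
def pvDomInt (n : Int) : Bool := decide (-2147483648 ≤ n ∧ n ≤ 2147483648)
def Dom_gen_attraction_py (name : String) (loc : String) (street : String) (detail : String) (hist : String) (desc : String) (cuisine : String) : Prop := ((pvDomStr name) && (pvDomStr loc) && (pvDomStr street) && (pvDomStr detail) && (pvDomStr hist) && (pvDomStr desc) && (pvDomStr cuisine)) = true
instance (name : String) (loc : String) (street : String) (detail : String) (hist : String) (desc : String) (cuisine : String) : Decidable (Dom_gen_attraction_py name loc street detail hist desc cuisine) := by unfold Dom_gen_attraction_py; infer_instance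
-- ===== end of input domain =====

-- B replaces A's ordered chain of per-group any() scans (early return) by one flat pass
-- over a keyword→priority list keeping the minimum matched priority, then a render table.

-- ===== PORT A =====
def gen_attraction_py (name : String) (loc : String) (street : String) (detail : String) (hist : String) (desc : String) (cuisine : String) : String :=
  if detail ≠ "" then name ++ ". " ++ detail
  else
    let nl := PySem.Str.lower name
    if ["field", "court", "batting cage", "rink", "arena"].any (fun kw => PySem.Str.isIn kw nl) then
      name ++ loc ++ ". Sports and recreation facility"
    else if ["fitness", "gym", "ymca", "planet fitness"].any (fun kw => PySem.Str.isIn kw nl) then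
      name ++ loc ++ ". Gym and fitness center"
    else if ["statue", "sculpture", "monument", "memorial"].any (fun kw => PySem.Str.isIn kw nl) then
      name ++ loc ++ ". Public monument worth a photo"
    else if ["festival", "fair", "event"].any (fun kw => PySem.Str.isIn kw nl) then
      name ++ ". Seasonal event and entertainment in Salem"
    else if ["photo", "portrait"].any (fun kw => PySem.Str.isIn kw nl) then
      name ++ loc ++ ". Photography and portrait sessions in Salem"
    else
      name ++ loc ++ ". Salem attraction worth a stop"

-- ===== PORT B =====
-- Source B's flat keyword→priority table
def kwTable : List (String × Nat) :=
  [("field", 0), ("court", 0), ("batting cage", 0), ("rink", 0), ("arena", 0),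
   ("fitness", 1), ("gym", 1), ("ymca", 1), ("planet fitness", 1),
   ("statue", 2), ("sculpture", 2), ("monument", 2), ("memorial", 2),
   ("festival", 3), ("fair", 3), ("event", 3),
   ("photo", 4), ("portrait", 4)]

-- Source B's _RENDER table
def renderTable : List (Bool × String) :=
  [(true, ". Sports and recreation facility"),
   (true, ". Gym and fitness center"),
   (true, ". Public monument worth a photo"),
   (false, ". Seasonal event and entertainment in Salem"),
   (true, ". Photography and portrait sessions in Salem")]

-- loop body: `if kw in nl and (best is None or pri < best): best = pri`
def bestStep (nl : String) (best : Option Nat) (kp : String × Nat) : Option Nat :=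
  if PySem.Str.isIn kp.1 nl then
    match best with
    | none => some kp.2
    | some b => if kp.2 < b then some kp.2 else best
  else best

def gen_attraction_py_alt (name : String) (loc : String) (street : String) (detail : String) (hist : String) (desc : String) (cuisine : String) : String :=
  if detail ≠ "" then name ++ ". " ++ detail
  else
    let nl := PySem.Str.lower name
    match kwTable.foldl (bestStep nl) none with
    | none => name ++ loc ++ ". Salem attraction worth a stop"
    | some best =>
      -- _RENDER[best]; best < 5 by construction, so the lookup never misses
      match renderTable[best]? with
      | some (includeLoc, tail) => name ++ (if includeLoc then loc else "") ++ tail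
      | none => ""

-- ===== PRECONDITION & SPEC =====
def Spec_gen_attraction_py (name : String) (loc : String) (street : String) (detail : String) (hist : String) (desc : String) (cuisine : String) (out : String) : Prop := out = gen_attraction_py_alt name loc street detail hist desc cuisine
instance (name : String) (loc : String) (street : String) (detail : String) (hist : String) (desc : String) (cuisine : String) (out : String) : Decidable (Spec_gen_attraction_py name loc street detail hist desc cuisine out) := by unfold Spec_gen_attraction_py; infer_instance

-- ===== CLAIM (what is proved, stated in full; the proofs are below) =====
def Claim_equal_gen_attraction_py : Prop := ∀ (name : String) (loc : String) (street : String) (detail : String) (hist : String) (desc : String) (cuisine : String), Dom_gen_attraction_py name loc street detail hist desc cuisine → Spec_gen_attraction_py name loc street detail hist desc cuisine (gen_attraction_py name loc street detail hist desc cuisine)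

-- ===== LEMMAS AND PROOFS =====

-- effect of one matching keyword of priority p on the accumulator
def pushPri (p : Nat) (s : Option Nat) : Option Nat :=
  match s with
  | none => some p
  | some b => if p < b then some p else some b

theorem pushPri_idem (p : Nat) (s : Option Nat) : pushPri p (pushPri p s) = pushPri p s := by
  cases s with
  | none => simp [pushPri]
  | some b => by_cases h : p < b <;> simp [pushPri, h]

theorem bestStep_eq (nl : String) (s : Option Nat) (k : String) (p : Nat) :
    bestStep nl s (k, p) = if PySem.Str.isIn k nl then pushPri p s else s := by
  cases s <;> simp [bestStep, pushPri]

-- folding one constant-priority group = pushPri if any keyword matches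
theorem fold_group (nl : String) (p : Nat) (ks : List String) (s : Option Nat) :
    List.foldl (bestStep nl) s (ks.map (fun k => (k, p)))
      = if ks.any (fun kw => PySem.Str.isIn kw nl) then pushPri p s else s := by
  induction ks generalizing s with
  | nil => simp
  | cons k ks ih =>
    simp only [List.map_cons, List.foldl_cons, List.any_cons, bestStep_eq, ih]
    by_cases h : PySem.Str.isIn k nl = true <;>
    by_cases h2 : (ks.any fun kw => PySem.Str.isIn kw nl) = true <;>
      simp only [h, h2, Bool.true_or, Bool.false_or, Bool.or_false, if_true, if_false,
        Bool.false_eq_true, pushPri_idem, ite_self, reduceIte]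

theorem kwTable_groups : kwTable
    = (["field", "court", "batting cage", "rink", "arena"].map (fun k => (k, 0)))
      ++ (["fitness", "gym", "ymca", "planet fitness"].map (fun k => (k, 1)))
      ++ (["statue", "sculpture", "monument", "memorial"].map (fun k => (k, 2)))
      ++ (["festival", "fair", "event"].map (fun k => (k, 3)))
      ++ (["photo", "portrait"].map (fun k => (k, 4))) := by rfl

-- ===== VERDICT (by name: the statement is the Claim_ definition above) =====
theorem gen_attraction_py_spec : Claim_equal_gen_attraction_py := by
  intro name loc street detail hist desc cuisine _
  unfold Spec_gen_attraction_py gen_attraction_py gen_attraction_py_alt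
  by_cases hd : detail ≠ ""
  · simp [hd]
  · simp only [hd, if_false]
    rw [kwTable_groups]
    simp only [List.foldl_append, fold_group]
    set nl := PySem.Str.lower name
    generalize (["field", "court", "batting cage", "rink", "arena"].any (fun kw => PySem.Str.isIn kw nl)) = b0
    generalize (["fitness", "gym", "ymca", "planet fitness"].any (fun kw => PySem.Str.isIn kw nl)) = b1
    generalize (["statue", "sculpture", "monument", "memorial"].any (fun kw => PySem.Str.isIn kw nl)) = b2
    generalize (["festival", "fair", "event"].any (fun kw => PySem.Str.isIn kw nl)) = b3
    generalize (["photo", "portrait"].any (fun kw => PySem.Str.isIn kw nl)) = b4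
    cases b0 <;> cases b1 <;> cases b2 <;> cases b3 <;> cases b4 <;>
      simp [pushPri, renderTable]
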